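-- pv_equiv track=rewrite | github.com/zbs/Question-Answering | main/Ranker.py | dict_intersection_length
-- ===== SOURCE A (Python) =====
-- def dict_intersection_length(d1,d2):
--     total = 0
--     for key in d1:
--         try:
--             total += intersection_length(d1[key], d2[key])
--         except KeyError:
--             pass
--     return total
--
-- def intersection_length(list1, list2):
--     return len(set(list1)&set(list2))
-- ===== SOURCE B (Python) =====
-- def dict_intersection_length(d1, d2):
--     pairs1 = {(k, v) for k, vs in d1.items() for v in vs}
--     pairs2 = {(k, v) for k, vs in d2.items() for v in vs}
--     return len(pairs1 & pairs2)
-- ===== Notes on version B (the rewrite author's own statement) =====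
-- stated objective: alternative
-- what changed: Instead of looping over keys and intersecting the two value-sets per key under try/except, B flattens each dict into one global set of (key, value) pairs and returns the size of a single set intersection of those pair sets.
import Mathlib
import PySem

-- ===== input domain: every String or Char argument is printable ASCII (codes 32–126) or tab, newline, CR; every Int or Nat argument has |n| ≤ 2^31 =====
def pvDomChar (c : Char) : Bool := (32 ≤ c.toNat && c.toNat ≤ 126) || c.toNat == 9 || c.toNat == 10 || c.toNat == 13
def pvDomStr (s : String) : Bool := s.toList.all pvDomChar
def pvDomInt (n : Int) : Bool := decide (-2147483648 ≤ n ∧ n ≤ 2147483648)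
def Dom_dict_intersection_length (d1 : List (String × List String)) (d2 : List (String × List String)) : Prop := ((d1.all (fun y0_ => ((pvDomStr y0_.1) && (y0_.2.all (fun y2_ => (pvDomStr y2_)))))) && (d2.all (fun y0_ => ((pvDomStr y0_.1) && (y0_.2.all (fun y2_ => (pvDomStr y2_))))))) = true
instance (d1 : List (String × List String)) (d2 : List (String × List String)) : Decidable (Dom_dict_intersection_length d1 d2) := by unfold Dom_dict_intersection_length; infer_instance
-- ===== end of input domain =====

-- B flattens each dict into one global set of (key, value) pairs and returns the size of a single
-- pair-set intersection, instead of A's per-key loop with try/except (objective: alternative).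

-- ===== PORT A =====
-- helper 'intersection_length' of the Python module
def intersection_length (list1 : List String) (list2 : List String) : Int :=
  PySem.Set.len (PySem.Set.inter (PySem.Set.ofList list1) (PySem.Set.ofList list2))

def dict_intersection_length (d1 : List (String × List String)) (d2 : List (String × List String)) : Int :=
  d1.foldl (fun total kv =>
    match (PySem.Dict.mk d2).get? kv.1 with
    | some l2 => total + intersection_length (((PySem.Dict.mk d1).get? kv.1).getD []) l2
    | none => total) 0

-- ===== PORT B =====
-- the pair-set comprehension {(k, v) for k, vs in d.items() for v in vs}
def pvPairSet (d : List (String × List String)) : PySem.Set (String × String) :=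
  PySem.Set.ofList (d.flatMap (fun kv => kv.2.map (fun v => (kv.1, v))))

def dict_intersection_length_alt (d1 : List (String × List String)) (d2 : List (String × List String)) : Int :=
  PySem.Set.len (PySem.Set.inter (pvPairSet d1) (pvPairSet d2))

-- ===== PRECONDITION & SPEC =====
-- Pre_ excludes association lists with a duplicate key (in d1 or d2): such a list does not arise
-- from any Python dict (the dict encoding has unique keys), so on it neither list-level behaviour
-- is behaviour of the Python programs.
def Pre_dict_intersection_length (d1 : List (String × List String)) (d2 : List (String × List String)) : Prop :=
  (d1.map Prod.fst).Nodup ∧ (d2.map Prod.fst).Nodup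

instance (d1 : List (String × List String)) (d2 : List (String × List String)) : Decidable (Pre_dict_intersection_length d1 d2) := by unfold Pre_dict_intersection_length; infer_instance

def pvWitness_dict_intersection_length : (List (String × List String)) × (List (String × List String)) :=
  ([("a", ["x", "y"]), ("b", ["z"])], [("a", ["y", "z"]), ("c", ["x"])])

def Spec_dict_intersection_length (d1 : List (String × List String)) (d2 : List (String × List String)) (out : Int) : Prop := out = dict_intersection_length_alt d1 d2
instance (d1 : List (String × List String)) (d2 : List (String × List String)) (out : Int) : Decidable (Spec_dict_intersection_length d1 d2 out) := by unfold Spec_dict_intersection_length; infer_instance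

-- ===== CLAIM (what is proved, stated in full; the proofs are below) =====
def Claim_equal_dict_intersection_length : Prop := ∀ (d1 : List (String × List String)) (d2 : List (String × List String)), Dom_dict_intersection_length d1 d2 → Pre_dict_intersection_length d1 d2 → Spec_dict_intersection_length d1 d2 (dict_intersection_length d1 d2)

-- ===== LEMMAS AND PROOFS =====

-- the flat pair list underlying pvPairSet
def pvPairs (d : List (String × List String)) : List (String × String) :=
  d.flatMap (fun kv => kv.2.map (fun v => (kv.1, v)))

-- the per-entry contribution of A's loop (d2, d1fix fixed)
def pvTerm (d1fix d2 : List (String × List String)) (kv : String × List String) : Int :=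
  match (PySem.Dict.mk d2).get? kv.1 with
  | some l2 => intersection_length (((PySem.Dict.mk d1fix).get? kv.1).getD []) l2
  | none => 0

-- the length of a Python set intersection of two set(list)s is a Finset card
theorem len_inter_eq_card (L1 L2 : List (String × String)) :
    PySem.Set.len (PySem.Set.inter (PySem.Set.ofList L1) (PySem.Set.ofList L2))
      = ((L1.toFinset ∩ L2.toFinset).card : Int) := by
  have hnd : (PySem.Set.inter (PySem.Set.ofList L1) (PySem.Set.ofList L2)).Nodup :=
    PySem.Set.nodup_inter _ _ (PySem.Set.nodup_ofList L1)
  have hfin : (PySem.Set.inter (PySem.Set.ofList L1) (PySem.Set.ofList L2)).toFinset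
      = L1.toFinset ∩ L2.toFinset := by
    ext p
    simp [PySem.Set.mem_inter, PySem.Set.mem_ofList]
  calc PySem.Set.len (PySem.Set.inter (PySem.Set.ofList L1) (PySem.Set.ofList L2))
      = ((PySem.Set.inter (PySem.Set.ofList L1) (PySem.Set.ofList L2)).length : Int) := by
        simp [PySem.Set.len]
    _ = ((PySem.Set.inter (PySem.Set.ofList L1) (PySem.Set.ofList L2)).toFinset.card : Int) := by
        rw [List.toFinset_card_of_nodup hnd]
    _ = ((L1.toFinset ∩ L2.toFinset).card : Int) := by rw [hfin]

-- same statement for the string lists inside intersection_length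
theorem intersection_length_eq_card (l1 l2 : List String) :
    intersection_length l1 l2 = ((l1.toFinset ∩ l2.toFinset).card : Int) := by
  unfold intersection_length
  have hnd : (PySem.Set.inter (PySem.Set.ofList l1) (PySem.Set.ofList l2)).Nodup :=
    PySem.Set.nodup_inter _ _ (PySem.Set.nodup_ofList l1)
  have hfin : (PySem.Set.inter (PySem.Set.ofList l1) (PySem.Set.ofList l2)).toFinset
      = l1.toFinset ∩ l2.toFinset := by
    ext v
    simp [PySem.Set.mem_inter, PySem.Set.mem_ofList]
  calc PySem.Set.len (PySem.Set.inter (PySem.Set.ofList l1) (PySem.Set.ofList l2))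
      = ((PySem.Set.inter (PySem.Set.ofList l1) (PySem.Set.ofList l2)).length : Int) := by
        simp [PySem.Set.len]
    _ = ((PySem.Set.inter (PySem.Set.ofList l1) (PySem.Set.ofList l2)).toFinset.card : Int) := by
        rw [List.toFinset_card_of_nodup hnd]
    _ = ((l1.toFinset ∩ l2.toFinset).card : Int) := by rw [hfin]

-- a successful dict lookup names an entry of the list
theorem get?_mk_some_mem (d : List (String × List String)) (k : String) (l2 : List String)
    (h : (PySem.Dict.mk d).get? k = some l2) : (k, l2) ∈ d := by
  induction d with
  | nil =>
    have h0 : (PySem.Dict.mk ([] : List (String × List String))).get? k = none := by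
      rw [PySem.Dict.get?_eq_none_iff_not_mem_keys]
      simp [PySem.Dict.keys_mk]
    rw [h0] at h
    simp at h
  | cons kv rest ih =>
    rcases kv with ⟨k', vs'⟩
    rw [PySem.Dict.get?_mk_cons] at h
    by_cases hk : k' == k
    · rw [if_pos hk] at h
      have hkk : k' = k := eq_of_beq hk
      have hv : vs' = l2 := Option.some.inj h
      rw [hkk, hv]
      exact List.mem_cons_self
    · rw [if_neg hk] at h
      exact List.mem_cons_of_mem _ (ih h)

-- with unique keys, every entry is found by the dict lookup
theorem get?_mk_nodup (d : List (String × List String)) (hnd : (d.map Prod.fst).Nodup)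
    (k : String) (vs : List String) (hm : (k, vs) ∈ d) :
    (PySem.Dict.mk d).get? k = some vs := by
  induction d with
  | nil => exact absurd hm (List.not_mem_nil)
  | cons kv rest ih =>
    rcases kv with ⟨k', vs'⟩
    rw [List.map_cons, List.nodup_cons] at hnd
    rw [PySem.Dict.get?_mk_cons]
    rcases List.mem_cons.1 hm with heq | htail
    · have hk' : k' = k := (Prod.ext_iff.1 heq.symm).1
      have hv' : vs' = vs := (Prod.ext_iff.1 heq.symm).2
      rw [if_pos (beq_iff_eq.2 hk'), hv']
    · have hne : (k' == k) = false := by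
        apply beq_eq_false_iff_ne.2
        intro hkk
        exact hnd.1 (hkk ▸ List.mem_map.2 ⟨(k, vs), htail, rfl⟩)
      rw [hne]
      simp only [Bool.false_eq_true, if_false]
      exact ih hnd.2 htail

-- membership in the flattened pair list
theorem mem_pvPairs (d : List (String × List String)) (k v : String) :
    (k, v) ∈ pvPairs d ↔ ∃ vs, (k, vs) ∈ d ∧ v ∈ vs := by
  unfold pvPairs
  simp only [List.mem_flatMap, List.mem_map, Prod.mk.injEq]
  constructor
  · rintro ⟨kv, hkv, w, hw, hk, hv⟩
    exact ⟨kv.2, by rw [← hk]; exact hkv, by rw [← hv]; exact hw⟩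
  · rintro ⟨vs, hvs, hv⟩
    exact ⟨(k, vs), hvs, v, hv, rfl, rfl⟩

-- a pair's key occurs among the keys
theorem pvPairs_key_mem (d : List (String × List String)) (k v : String)
    (h : (k, v) ∈ pvPairs d) : k ∈ d.map Prod.fst := by
  rcases (mem_pvPairs d k v).1 h with ⟨vs, hvs, _⟩
  exact List.mem_map.2 ⟨(k, vs), hvs, rfl⟩

-- A's loop is the sum of the per-entry contributions
theorem loopA_eq_sum (d1fix d2 : List (String × List String))
    (l : List (String × List String)) (t : Int) :
    l.foldl (fun total kv =>
      match (PySem.Dict.mk d2).get? kv.1 with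
      | some l2 => total + intersection_length (((PySem.Dict.mk d1fix).get? kv.1).getD []) l2
      | none => total) t
    = t + (l.map (pvTerm d1fix d2)).sum := by
  induction l generalizing t with
  | nil => simp
  | cons kv rest ih =>
    simp only [List.foldl_cons, List.map_cons, List.sum_cons]
    rcases hs : (PySem.Dict.mk d2).get? kv.1 with _ | l2
    · rw [ih]
      unfold pvTerm
      rw [hs]
      ring
    · rw [ih]
      unfold pvTerm
      rw [hs]
      ring

-- the key partition: the card of the pair-set intersection is the sum of the per-key cards
theorem card_pairs_inter (d2 : List (String × List String)) (hnd2 : (d2.map Prod.fst).Nodup)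
    (d1 : List (String × List String)) (hnd1 : (d1.map Prod.fst).Nodup) :
    ((((pvPairs d1).toFinset ∩ (pvPairs d2).toFinset).card : Int))
      = (d1.map (fun kv =>
          match (PySem.Dict.mk d2).get? kv.1 with
          | some l2 => ((kv.2.toFinset ∩ l2.toFinset).card : Int)
          | none => 0)).sum := by
  induction d1 with
  | nil => simp [pvPairs]
  | cons kv rest ih =>
    rcases kv with ⟨k, vs⟩
    rw [List.map_cons, List.nodup_cons] at hnd1
    have hpairs : pvPairs ((k, vs) :: rest) = vs.map (fun v => (k, v)) ++ pvPairs rest := by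
      simp [pvPairs]
    rw [hpairs, List.toFinset_append, Finset.union_inter_distrib_right]
    have hdisj : Disjoint ((vs.map (fun v => (k, v))).toFinset ∩ (pvPairs d2).toFinset)
        ((pvPairs rest).toFinset ∩ (pvPairs d2).toFinset) := by
      rw [Finset.disjoint_left]
      intro p hp hp'
      have hp1 : p ∈ (vs.map (fun v => (k, v))).toFinset := (Finset.mem_inter.1 hp).1
      have hp2 : p ∈ (pvPairs rest).toFinset := (Finset.mem_inter.1 hp').1
      rcases List.mem_map.1 (List.mem_toFinset.1 hp1) with ⟨v, _, hpv⟩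
      have hk : p.1 = k := by rw [← hpv]
      have : k ∈ rest.map Prod.fst := by
        have := pvPairs_key_mem rest p.1 p.2 (by
          have : p = (p.1, p.2) := rfl
          rw [← this]; exact List.mem_toFinset.1 hp2)
        rwa [hk] at this
      exact hnd1.1 this
    rw [Finset.card_union_of_disjoint hdisj]
    push_cast
    rw [List.map_cons, List.sum_cons, ih hnd1.2]
    congr 1
    -- per-key card
    rcases hs : (PySem.Dict.mk d2).get? k with _ | l2
    · -- k not a key of d2: the left block misses the intersection entirely
      have hknot : k ∉ d2.map Prod.fst := by
        intro hk
        rcases List.mem_map.1 hk with ⟨kv2, hkv2, hfst⟩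
        have hsome := get?_mk_nodup d2 hnd2 k kv2.2 (by
          have hkv2' : kv2 = (kv2.1, kv2.2) := rfl
          rw [← hfst]; exact hkv2' ▸ hkv2)
        rw [hsome] at hs
        simp at hs
      have hempty : (vs.map (fun v => (k, v))).toFinset ∩ (pvPairs d2).toFinset = ∅ := by
        rw [Finset.eq_empty_iff_forall_notMem]
        intro p hp
        have hp1 := (Finset.mem_inter.1 hp).1
        have hp2 := (Finset.mem_inter.1 hp).2
        rcases List.mem_map.1 (List.mem_toFinset.1 hp1) with ⟨v, _, hpv⟩
        have hk : p.1 = k := by rw [← hpv]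
        have : p.1 ∈ d2.map Prod.fst :=
          pvPairs_key_mem d2 p.1 p.2 (List.mem_toFinset.1 hp2)
        exact hknot (hk ▸ this)
      rw [hempty]
      simp
    · -- k maps to l2 in d2
      have hmem2 : (k, l2) ∈ d2 := get?_mk_some_mem d2 k l2 hs
      have himage : (vs.map (fun v => (k, v))).toFinset ∩ (pvPairs d2).toFinset
          = (vs.toFinset ∩ l2.toFinset).image (fun v => (k, v)) := by
        ext p
        constructor
        · intro hp
          have hp1 := (Finset.mem_inter.1 hp).1
          have hp2 := (Finset.mem_inter.1 hp).2
          rcases List.mem_map.1 (List.mem_toFinset.1 hp1) with ⟨v, hv, hpv⟩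
          have hpl2 : v ∈ l2 := by
            have hkv : (k, v) ∈ pvPairs d2 := by rw [hpv]; exact List.mem_toFinset.1 hp2
            rcases (mem_pvPairs d2 k v).1 hkv with ⟨vs2, hvs2, hvv⟩
            have := get?_mk_nodup d2 hnd2 k vs2 hvs2
            rw [hs] at this
            have : l2 = vs2 := Option.some.inj this
            rwa [this]
          exact Finset.mem_image.2 ⟨v, Finset.mem_inter.2 ⟨List.mem_toFinset.2 hv,
            List.mem_toFinset.2 hpl2⟩, hpv⟩
        · intro hp
          rcases Finset.mem_image.1 hp with ⟨v, hv, hpv⟩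
          have hv1 : v ∈ vs := List.mem_toFinset.1 (Finset.mem_inter.1 hv).1
          have hv2 : v ∈ l2 := List.mem_toFinset.1 (Finset.mem_inter.1 hv).2
          refine Finset.mem_inter.2 ⟨List.mem_toFinset.2 ?_, List.mem_toFinset.2 ?_⟩
          · rw [← hpv]; exact List.mem_map.2 ⟨v, hv1, rfl⟩
          · rw [← hpv]; exact (mem_pvPairs d2 k v).2 ⟨l2, hmem2, hv2⟩
      rw [himage, Finset.card_image_of_injective _ (fun a b h => by injection h)]

-- ===== VERDICT (by name: the statement is the Claim_ definition above) =====
theorem dict_intersection_length_spec : Claim_equal_dict_intersection_length := by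
  intro d1 d2 _ hpre
  rcases hpre with ⟨hnd1, hnd2⟩
  unfold Spec_dict_intersection_length dict_intersection_length dict_intersection_length_alt
  rw [loopA_eq_sum d1 d2 d1 0, zero_add]
  unfold pvPairSet
  have hB : PySem.Set.len (PySem.Set.inter
      (PySem.Set.ofList (d1.flatMap (fun kv => kv.2.map (fun v => (kv.1, v)))))
      (PySem.Set.ofList (d2.flatMap (fun kv => kv.2.map (fun v => (kv.1, v))))))
      = (((pvPairs d1).toFinset ∩ (pvPairs d2).toFinset).card : Int) := by
    unfold pvPairs
    exact len_inter_eq_card _ _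
  rw [hB, card_pairs_inter d2 hnd2 d1 hnd1]
  apply congrArg List.sum
  apply List.map_congr_left
  intro kv hkv
  unfold pvTerm
  rcases hs : (PySem.Dict.mk d2).get? kv.1 with _ | l2
  · rfl
  · have hget1 : (PySem.Dict.mk d1).get? kv.1 = some kv.2 :=
      get?_mk_nodup d1 hnd1 kv.1 kv.2 hkv
    rw [hget1, Option.getD_some]
    simp [intersection_length_eq_card]
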